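-- pv_equiv track=rewrite | github.com/YBRua/LeetCode | 2560-house-robber-iv/main.py | _can_steal_k_houses_with
-- ===== SOURCE A (Python) =====
-- from typing import List
--
-- def _can_steal_k_houses_with(capability: int, nums: List[int], k: int) -> bool:
--     i = 0
--     cnt = 0
--     while i < len(nums):
--         if nums[i] <= capability:
--             cnt += 1
--             i += 2
--         else:
--             i += 1
--
--     return cnt >= k
-- ===== SOURCE B (Python) =====
-- from typing import List
--
--
-- def _can_steal_k_houses_with(capability: int, nums: List[int], k: int) -> bool:
--     # Two-state DP: `take` = best count of non-adjacent eligible houses with the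
--     # current house taken (None if it cannot be taken), `skip` = best count with
--     # the current house not taken.
--     take, skip = None, 0
--     for x in nums:
--         new_take = skip + 1 if x <= capability else None
--         new_skip = skip if take is None else max(take, skip)
--         take, skip = new_take, new_skip
--     best = skip if take is None else max(take, skip)
--     return best >= k
-- ===== Notes on version B (the rewrite author's own statement) =====
-- stated objective: alternative
-- what changed: Replaces the greedy index scan with skip-by-2 jumps by a classic two-state max-non-adjacent DP (take/skip fold) thresholded at k.
import Mathlib
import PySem

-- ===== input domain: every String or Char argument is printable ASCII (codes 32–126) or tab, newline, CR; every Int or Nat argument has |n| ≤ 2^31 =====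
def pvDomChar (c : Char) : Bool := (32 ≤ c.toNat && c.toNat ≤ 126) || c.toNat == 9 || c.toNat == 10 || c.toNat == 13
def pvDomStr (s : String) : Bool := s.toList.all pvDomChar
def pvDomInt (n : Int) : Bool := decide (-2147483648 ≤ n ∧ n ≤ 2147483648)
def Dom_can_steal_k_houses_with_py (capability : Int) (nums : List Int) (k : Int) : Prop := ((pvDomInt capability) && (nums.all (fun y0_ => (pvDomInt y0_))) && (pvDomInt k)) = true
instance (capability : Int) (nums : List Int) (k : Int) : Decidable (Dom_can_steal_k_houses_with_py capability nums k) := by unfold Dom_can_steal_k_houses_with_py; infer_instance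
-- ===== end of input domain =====

-- B replaces A's greedy skip-by-2 index scan with a two-state max-non-adjacent DP (alternative, same cost).

-- ===== PORT A =====
-- the while loop of A: i is the index, cnt the count so far
def pvALoop (capability : Int) (nums : List Int) (i : Nat) (cnt : Int) : Int :=
  if h : i < nums.length then
    if nums[i] ≤ capability then
      pvALoop capability nums (i + 2) (cnt + 1)
    else
      pvALoop capability nums (i + 1) cnt
  else cnt
termination_by nums.length - i

def can_steal_k_houses_with_py (capability : Int) (nums : List Int) (k : Int) : Bool :=
  decide (pvALoop capability nums 0 0 ≥ k)

-- ===== PORT B =====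
-- one DP step of Source B's loop body: state = (take, skip)
def pvBStep (capability : Int) (st : Option Int × Int) (x : Int) : Option Int × Int :=
  let newTake : Option Int := if x ≤ capability then some (st.2 + 1) else none
  let newSkip : Int := match st.1 with
    | none => st.2
    | some t => max t st.2
  (newTake, newSkip)

def can_steal_k_houses_with_py_alt (capability : Int) (nums : List Int) (k : Int) : Bool :=
  let st := nums.foldl (pvBStep capability) (none, 0)
  let best : Int := match st.1 with
    | none => st.2
    | some t => max t st.2
  decide (best ≥ k)

-- ===== PRECONDITION & SPEC =====
def Spec_can_steal_k_houses_with_py (capability : Int) (nums : List Int) (k : Int) (out : Bool) : Prop := out = can_steal_k_houses_with_py_alt capability nums k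
instance (capability : Int) (nums : List Int) (k : Int) (out : Bool) : Decidable (Spec_can_steal_k_houses_with_py capability nums k out) := by unfold Spec_can_steal_k_houses_with_py; infer_instance

-- ===== CLAIM (what is proved, stated in full; the proofs are below) =====
def Claim_equal_can_steal_k_houses_with_py : Prop := ∀ (capability : Int) (nums : List Int) (k : Int), Dom_can_steal_k_houses_with_py capability nums k → Spec_can_steal_k_houses_with_py capability nums k (can_steal_k_houses_with_py capability nums k)

-- ===== LEMMAS AND PROOFS =====

-- greedy count of A, recast on lists (1 + skip the next element when eligible)
def pvG (capability : Int) : List Int → Int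
  | [] => 0
  | x :: r => if x ≤ capability then 1 + pvG capability r.tail else pvG capability r
termination_by l => l.length
decreasing_by all_goals simp [List.length_tail]

-- maximal number of non-adjacent eligible houses
def pvM (capability : Int) : List Int → Int
  | [] => 0
  | x :: r => if x ≤ capability then max (1 + pvM capability r.tail) (pvM capability r)
              else pvM capability r
termination_by l => l.length
decreasing_by all_goals simp [List.length_tail]

theorem pvM_tail_le (capability : Int) (l : List Int) : pvM capability l.tail ≤ pvM capability l := by
  cases l with
  | nil => simp
  | cons x r =>
    rw [pvM]
    split <;> simp

theorem pvM_cons_le (capability : Int) (x : Int) (r : List Int) :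
    pvM capability (x :: r) ≤ 1 + pvM capability r := by
  rw [pvM]
  have h := pvM_tail_le capability r
  split <;> omega

-- the greedy is optimal
theorem pvG_eq_pvM (capability : Int) (l : List Int) : pvG capability l = pvM capability l := by
  generalize hn : l.length = n
  induction n using Nat.strong_induction_on generalizing l with
  | _ n ih =>
    cases l with
    | nil => simp [pvG, pvM]
    | cons x r =>
      rw [pvG, pvM]
      by_cases hx : x ≤ capability
      · simp only [hx, if_true]
        have h1 : pvG capability r.tail = pvM capability r.tail := by
          apply ih r.tail.length _ r.tail rfl
          have : r.tail.length = r.length - 1 := List.length_tail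
          simp at hn; omega
        have h2 : pvM capability r ≤ 1 + pvM capability r.tail := by
          cases r with
          | nil => simp
          | cons y t => exact pvM_cons_le capability y t
        have h3 : pvM capability r.tail ≤ pvM capability r := pvM_tail_le capability r
        omega
      · simp only [hx, if_false]
        apply ih r.length _ r rfl
        simp at hn; omega

-- A's loop computes cnt + greedy count of the remaining suffix
theorem pvALoop_eq (capability : Int) (nums : List Int) (i : Nat) (cnt : Int) :
    pvALoop capability nums i cnt = cnt + pvG capability (nums.drop i) := by
  generalize hn : nums.length - i = n
  induction n using Nat.strong_induction_on generalizing i cnt with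
  | _ n ih =>
    rw [pvALoop]
    by_cases h : i < nums.length
    · simp only [h, dif_pos]
      have hdrop : nums.drop i = nums[i] :: nums.drop (i + 1) :=
        List.drop_eq_getElem_cons h
      have htail : (nums.drop (i + 1)).tail = nums.drop (i + 2) := by
        rw [List.tail_drop]
      rw [hdrop, pvG, htail]
      by_cases hx : nums[i] ≤ capability
      · simp only [hx, if_true]
        rw [ih (nums.length - (i + 2)) (by omega) (i + 2) (cnt + 1) rfl]
        ring
      · simp only [hx, if_false]
        rw [ih (nums.length - (i + 1)) (by omega) (i + 1) cnt rfl]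
    · simp only [h, dif_neg, not_false_iff]
      rw [List.drop_eq_nil_of_le (by omega)]
      simp [pvG]

-- best value extractable from a DP state
def pvBest (st : Option Int × Int) : Int :=
  match st.1 with
  | none => st.2
  | some t => max t st.2

-- B's fold invariant: from state (t, s), the final best is
-- max (t + pvM (tail rest)) (s + pvM rest), the t-branch absent when t = none
theorem pvBFold_eq (capability : Int) (rest : List Int) (t : Option Int) (s : Int) :
    pvBest (rest.foldl (pvBStep capability) (t, s)) =
      match t with
      | none => s + pvM capability rest
      | some tv => max (tv + pvM capability rest.tail) (s + pvM capability rest) := by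
  induction rest generalizing t s with
  | nil => cases t <;> simp [pvBest, pvM]
  | cons x r ih =>
    rw [List.foldl_cons]
    show pvBest (r.foldl (pvBStep capability) (pvBStep capability (t, s) x)) = _
    rw [pvBStep]
    by_cases hx : x ≤ capability
    · simp only [hx, if_true]
      rw [ih]
      have hM : pvM capability (x :: r) = max (1 + pvM capability r.tail) (pvM capability r) := by
        rw [pvM]; simp [hx]
      cases t <;> dsimp only <;> simp only [List.tail_cons, hM] <;> omega
    · simp only [hx, if_false]
      rw [ih]
      have hM : pvM capability (x :: r) = pvM capability r := by
        rw [pvM]; simp [hx]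
      cases t <;> dsimp only <;> simp only [List.tail_cons, hM] <;> omega

-- ===== VERDICT (by name: the statement is the Claim_ definition above) =====
theorem can_steal_k_houses_with_py_spec : Claim_equal_can_steal_k_houses_with_py := by
  intro capability nums k _
  unfold Spec_can_steal_k_houses_with_py
  have hB2 : can_steal_k_houses_with_py_alt capability nums k
      = decide (pvBest (nums.foldl (pvBStep capability) (none, 0)) ≥ k) := rfl
  have hBval : pvBest (nums.foldl (pvBStep capability) (none, 0)) = pvM capability nums := by
    rw [pvBFold_eq]; simp
  rw [hB2, hBval]
  show decide (pvALoop capability nums 0 0 ≥ k) = decide (pvM capability nums ≥ k)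
  rw [pvALoop_eq]; simp [pvG_eq_pvM]
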